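-- pv_equiv track=rewrite | github.com/KristianWold/eddqc | src/experimental.py | marginalize_counts
-- ===== SOURCE A (Python) =====
-- def marginalize_counts(counts_list, site):
--     counts_new_list = []
--     for counts in counts_list:
--         dict = {}
--         for key, value in counts.items():
--             new_key = key[:site] + key[site+1:]
--             if new_key in dict:
--                 dict[new_key] += value
--             else:
--                 dict[new_key] = value
--
--         counts_new_list.append(dict)
--
--     return counts_new_list
-- ===== SOURCE B (Python) =====
-- def marginalize_counts(counts_list, site):
--     result = []
--     for counts in counts_list:
--         pairs = [(key[:site] + key[site + 1:], value) for key, value in counts.items()]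
--         order = list(dict.fromkeys(new_key for new_key, _ in pairs))
--         result.append({k: sum(v for kk, v in pairs if kk == k) for k in order})
--     return result
-- ===== Notes on version B (the rewrite author's own statement) =====
-- stated objective: alternative
-- what changed: Replaces A's on-the-fly dict accumulation (membership test then += or assignment per item) with a table-building pass: materialize all (marginalized key, value) pairs, dedup the keys in first-appearance order, then build each output dict by summing the matching values per distinct key.
import Mathlib
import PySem

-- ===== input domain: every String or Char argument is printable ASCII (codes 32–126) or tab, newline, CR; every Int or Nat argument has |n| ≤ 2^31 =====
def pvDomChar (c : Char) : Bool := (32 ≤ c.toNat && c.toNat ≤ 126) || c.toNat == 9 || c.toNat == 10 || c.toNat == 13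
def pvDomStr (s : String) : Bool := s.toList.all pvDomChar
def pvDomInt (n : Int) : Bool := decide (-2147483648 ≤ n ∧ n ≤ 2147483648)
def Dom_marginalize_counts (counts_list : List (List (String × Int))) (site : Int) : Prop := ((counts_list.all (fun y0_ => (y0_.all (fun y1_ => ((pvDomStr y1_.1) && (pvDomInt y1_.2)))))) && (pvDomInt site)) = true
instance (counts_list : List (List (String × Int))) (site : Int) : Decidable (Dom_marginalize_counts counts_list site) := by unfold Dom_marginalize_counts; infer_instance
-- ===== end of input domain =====

-- B replaces A's on-the-fly dict accumulation by a table pass: build all (marginalized key, value)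
-- pairs, dedup the keys in first-appearance order, then sum the matching values per distinct key
-- (alternative decomposition, similar cost).


-- key[:site] + key[site+1:]  (shared by both ports; exact Python slice semantics via PySem.Str.slice)
def pvNewKey (site : Int) (key : String) : String :=
  PySem.Str.slice key none (some site) ++ PySem.Str.slice key (some (site + 1)) none

-- ===== PORT A =====
-- for counts in counts_list: dict = {}; for key, value in counts.items(): … ; append(dict)
def marginalize_counts (counts_list : List (List (String × Int))) (site : Int) : List (List (String × Int)) :=
  counts_list.foldl
    (fun counts_new_list counts =>
      counts_new_list ++
        [(counts.foldl
            (fun d kv =>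
              let new_key := pvNewKey site kv.1
              if d.contains new_key then d.modify new_key 0 (· + kv.2)
              else d.insert new_key kv.2)
            PySem.Dict.empty).items])
    []

-- ===== PORT B =====
-- pairs table, dedup of the new keys (dict.fromkeys), then one dict per input built by per-key sums
def marginalize_counts_alt (counts_list : List (List (String × Int))) (site : Int) : List (List (String × Int)) :=
  counts_list.foldl
    (fun result counts =>
      let pairs := counts.map (fun kv => (pvNewKey site kv.1, kv.2))
      let order := PySem.List.dedup (pairs.map Prod.fst)
      result ++
        [order.map (fun k => (k, ((pairs.filter (fun p => p.1 == k)).map Prod.snd).sum))])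
    []

-- ===== PRECONDITION & SPEC =====
def Spec_marginalize_counts (counts_list : List (List (String × Int))) (site : Int) (out : List (List (String × Int))) : Prop := out = marginalize_counts_alt counts_list site
instance (counts_list : List (List (String × Int))) (site : Int) (out : List (List (String × Int))) : Decidable (Spec_marginalize_counts counts_list site out) := by unfold Spec_marginalize_counts; infer_instance

-- ===== CLAIM (what is proved, stated in full; the proofs are below) =====
def Claim_equal_marginalize_counts : Prop := ∀ (counts_list : List (List (String × Int))) (site : Int), Dom_marginalize_counts counts_list site → Spec_marginalize_counts counts_list site (marginalize_counts counts_list site)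

-- ===== LEMMAS AND PROOFS =====

-- a loop appending one element per item is a map
theorem pv_foldl_append_singleton_eq_map {α β : Type} (g : α → β) (l : List α) (acc : List β) :
    l.foldl (fun acc x => acc ++ [g x]) acc = acc ++ l.map g := by
  induction l generalizing acc with
  | nil => simp
  | cons x xs ih => simp [List.foldl_cons, ih]

-- A's branched step is a single Dict.modify
theorem pv_step_eq_modify (d : PySem.Dict String Int) (k : String) (v : Int) :
    (if d.contains k then d.modify k 0 (· + v) else d.insert k v) = d.modify k 0 (· + v) := by
  by_cases h : d.contains k = true
  · simp [h]
  · simp only [Bool.not_eq_true] at h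
    simp [h, PySem.Dict.modify, PySem.Dict.getD_of_not_contains _ _ h]

-- running sums of a modify-accumulation loop
theorem pv_getD_foldl_modify_sum (l : List (String × Int)) (d : PySem.Dict String Int) (c : String) :
    (l.foldl (fun d p => d.modify p.1 0 (· + p.2)) d).getD c 0
      = d.getD c 0 + ((l.filter (fun p => p.1 == c)).map Prod.snd).sum := by
  induction l generalizing d with
  | nil => simp
  | cons p ps ih =>
    rw [List.foldl_cons, ih]
    by_cases h : p.1 = c
    · simp [h]
      ring
    · simp [h, PySem.Dict.getD_modify, Ne.symm h]

-- the inner loop of A produces exactly B's grouped table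
theorem pv_inner_eq (site : Int) (counts : List (String × Int)) :
    (counts.foldl
        (fun d kv =>
          let new_key := pvNewKey site kv.1
          if d.contains new_key then d.modify new_key 0 (· + kv.2)
          else d.insert new_key kv.2)
        PySem.Dict.empty).items
      = (PySem.List.dedup ((counts.map (fun kv => (pvNewKey site kv.1, kv.2))).map Prod.fst)).map
          (fun k => (k, (((counts.map (fun kv => (pvNewKey site kv.1, kv.2))).filter
              (fun p => p.1 == k)).map Prod.snd).sum)) := by
  have hstep : (fun (d : PySem.Dict String Int) (kv : String × Int) =>
      let new_key := pvNewKey site kv.1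
      if d.contains new_key then d.modify new_key 0 (· + kv.2)
      else d.insert new_key kv.2)
      = fun d kv => d.modify (pvNewKey site kv.1) 0 (· + kv.2) := by
    funext d kv
    exact pv_step_eq_modify d (pvNewKey site kv.1) kv.2
  rw [hstep]
  have hfold : counts.foldl (fun d kv => d.modify (pvNewKey site kv.1) 0 (· + kv.2))
      (PySem.Dict.empty : PySem.Dict String Int)
      = (counts.map (fun kv => (pvNewKey site kv.1, kv.2))).foldl
          (fun d p => d.modify p.1 0 (· + p.2)) PySem.Dict.empty := by
    rw [List.foldl_map]
  rw [hfold]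
  set pairs := counts.map (fun kv => (pvNewKey site kv.1, kv.2)) with hpairs
  have hkeys : ((pairs).foldl (fun d p => d.modify p.1 0 (· + p.2))
      (PySem.Dict.empty : PySem.Dict String Int)).keys
      = PySem.Set.ofList (pairs.map Prod.fst) := by
    rw [PySem.Dict.keys_foldl_modify_key pairs Prod.fst 0 (fun _ p => (· + p.2))]
    simp [PySem.Dict.keys_empty, PySem.Set.update_nil_left]
  have hnodup : ((pairs).foldl (fun d p => d.modify p.1 0 (· + p.2))
      (PySem.Dict.empty : PySem.Dict String Int)).keys.Nodup := by
    apply PySem.Dict.nodup_keys_foldl_modify_key pairs Prod.fst 0 (fun _ p => (· + p.2))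
    simp [PySem.Dict.keys_empty]
  rw [PySem.Dict.items_eq_map_keys _ hnodup 0, hkeys, PySem.List.dedup_eq_ofList]
  apply List.map_congr_left
  intro k _
  rw [pv_getD_foldl_modify_sum]
  simp [PySem.Dict.getD_empty]

-- ===== VERDICT (by name: the statement is the Claim_ definition above) =====
theorem marginalize_counts_spec : Claim_equal_marginalize_counts := by
  intro counts_list site _
  unfold Spec_marginalize_counts marginalize_counts marginalize_counts_alt
  rw [pv_foldl_append_singleton_eq_map, pv_foldl_append_singleton_eq_map]
  simp only [List.nil_append]
  apply List.map_congr_left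
  intro counts _
  exact pv_inner_eq site counts
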